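-- pv_equiv track=rewrite | github.com/kestrel-git/algo | programmers/lv_0/이차원 배열 대각선 순회하기.py | solution
-- ===== SOURCE A (Python) =====
-- def solution(board, k):
--     res = 0
--     for i, r_arr in enumerate(board):
--         for j, num in enumerate(r_arr):
--             if i + j <= k:
--                 res += num
--             else:
--                 break
--     return res
-- ===== SOURCE B (Python) =====
-- def solution(board, k):
--     # Diagonal-major traversal: walk anti-diagonals d = 0, 1, ... and pick
--     # board[i][d-i] for every row where that column exists; elements with
--     # i+j <= k are exactly those on diagonals d <= k.
--     if not board:
--         return 0
--     depth = len(board)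
--     width = max(len(r) for r in board)
--     res = 0
--     for d in range(min(k, depth + width - 2) + 1):
--         for i, row in enumerate(board):
--             j = d - i
--             if 0 <= j < len(row):
--                 res += row[j]
--     return res
-- ===== Notes on version B (the rewrite author's own statement) =====
-- stated objective: alternative
-- what changed: Traverses the board diagonal-major (for each anti-diagonal d <= k, index board[i][d-i] across rows) instead of A's row-major scan with an early break, after computing the board's depth and maximum width to bound the diagonals.
import Mathlib
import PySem

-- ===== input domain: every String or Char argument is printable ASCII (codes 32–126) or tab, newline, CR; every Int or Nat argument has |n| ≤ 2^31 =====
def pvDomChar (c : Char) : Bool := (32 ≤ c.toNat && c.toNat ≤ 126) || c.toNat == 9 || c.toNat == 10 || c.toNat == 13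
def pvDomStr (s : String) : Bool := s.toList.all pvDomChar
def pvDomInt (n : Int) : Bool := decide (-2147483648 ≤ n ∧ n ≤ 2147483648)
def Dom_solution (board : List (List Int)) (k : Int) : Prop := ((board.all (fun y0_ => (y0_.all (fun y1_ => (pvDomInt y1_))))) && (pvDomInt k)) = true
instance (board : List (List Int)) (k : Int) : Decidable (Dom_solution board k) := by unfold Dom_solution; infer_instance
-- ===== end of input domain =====

-- B traverses the board diagonal-major (for each anti-diagonal d ≤ k, index board[i][d-i]
-- across the rows) instead of A's row-major scan with an early break (alternative algorithm).

-- ===== PORT A =====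
-- inner loop over a row: add while i+j ≤ k, else break (return res)
def pvInnerA (i k : Int) (j res : Int) : List Int → Int
  | [] => res
  | num :: rest => if i + j ≤ k then pvInnerA i k (j + 1) (res + num) rest else res

-- outer loop over rows
def pvOuterA (k : Int) (i res : Int) : List (List Int) → Int
  | [] => res
  | r :: rs => pvOuterA k (i + 1) (pvInnerA i k 0 res r) rs

def solution (board : List (List Int)) (k : Int) : Int := pvOuterA k 0 0 board

-- ===== PORT B =====
-- inner loop over the rows for one fixed diagonal d: 'for i, row in enumerate(board): …'
def pvInnerB (board : List (List Int)) (d res : Int) : Int :=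
  (PySem.List.enumerate board 0).foldl
    (fun acc p =>
      if 0 ≤ d - p.1 ∧ d - p.1 < (p.2.length : Int) then acc + PySem.List.pyGetD p.2 (d - p.1) 0
      else acc) res

-- 'max(len(r) for r in board)': row lengths are ≥ 0, so folding max from 0 is exact on a nonempty board
def pvWidth (board : List (List Int)) : Int :=
  (board.map (fun r => (r.length : Int))).foldl max 0

def solution_alt (board : List (List Int)) (k : Int) : Int :=
  if board = [] then 0
  else
    (PySem.List.pyRange 0 (min k ((board.length : Int) + pvWidth board - 2) + 1) 1).foldl
      (fun res d => pvInnerB board d res) 0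

-- ===== PRECONDITION & SPEC =====
def Spec_solution (board : List (List Int)) (k : Int) (out : Int) : Prop := out = solution_alt board k
instance (board : List (List Int)) (k : Int) (out : Int) : Decidable (Spec_solution board k out) := by unfold Spec_solution; infer_instance

-- ===== CLAIM (what is proved, stated in full; the proofs are below) =====
def Claim_equal_solution : Prop := ∀ (board : List (List Int)) (k : Int), Dom_solution board k → Spec_solution board k (solution board k)

-- ===== LEMMAS AND PROOFS =====

-- A's inner loop sums the prefix of the row up to column k - i
theorem pvInnerA_eq (i k : Int) (r : List Int) : ∀ (j res : Int),
    pvInnerA i k j res r = res + (r.take (k - i - j + 1).toNat).sum := by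
  induction r with
  | nil => intro j res; simp [pvInnerA]
  | cons num rest ih =>
    intro j res
    simp only [pvInnerA]
    by_cases h : i + j ≤ k
    · rw [if_pos h, ih]
      have h1 : (k - i - j + 1).toNat = (k - i - (j + 1) + 1).toNat + 1 := by omega
      rw [h1]
      simp [List.take_succ_cons]
      ring
    · rw [if_neg h]
      have h0 : (k - i - j + 1).toNat = 0 := by omega
      simp [h0]

-- A's value as a sum of per-row prefix sums over the enumerated board
theorem pvOuterA_eq (k : Int) (bs : List (List Int)) : ∀ (i res : Int),
    pvOuterA k i res bs = res + ((PySem.List.enumerate bs i).map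
      (fun p => (p.2.take (k - p.1 + 1).toNat).sum)).sum := by
  induction bs with
  | nil => intro i res; simp [pvOuterA, PySem.List.enumerate_nil]
  | cons r rs ih =>
    intro i res
    simp only [pvOuterA, PySem.List.enumerate_cons, List.map_cons, List.sum_cons]
    rw [ih, pvInnerA_eq]
    have : (k - i - 0 + 1).toNat = (k - i + 1).toNat := by omega
    rw [this]
    ring

-- B's inner loop as a sum over the enumerated board
theorem pvInnerB_eq (board : List (List Int)) (d res : Int) :
    pvInnerB board d res = res + ((PySem.List.enumerate board 0).map
      (fun p => if 0 ≤ d - p.1 ∧ d - p.1 < (p.2.length : Int)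
                then PySem.List.pyGetD p.2 (d - p.1) 0 else 0)).sum := by
  unfold pvInnerB
  have hc : ∀ (acc : Int) (p : Int × List Int),
      (if 0 ≤ d - p.1 ∧ d - p.1 < (p.2.length : Int) then acc + PySem.List.pyGetD p.2 (d - p.1) 0
       else acc)
      = acc + (if 0 ≤ d - p.1 ∧ d - p.1 < (p.2.length : Int)
               then PySem.List.pyGetD p.2 (d - p.1) 0 else 0) := by
    intro acc p; split_ifs <;> simp
  have hfe : ∀ (l : List (Int × List Int)) (res : Int),
      l.foldl (fun acc p =>
        if 0 ≤ d - p.1 ∧ d - p.1 < (p.2.length : Int) then acc + PySem.List.pyGetD p.2 (d - p.1) 0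
        else acc) res
      = l.foldl (fun acc p => acc + (if 0 ≤ d - p.1 ∧ d - p.1 < (p.2.length : Int)
           then PySem.List.pyGetD p.2 (d - p.1) 0 else 0)) res := by
    intro l
    induction l with
    | nil => intro res; rfl
    | cons x t _ => intro res; simp only [List.foldl_cons, hc]
  rw [hfe]
  exact PySem.List.foldl_add _ _ _

-- double sums over two lists commute
theorem pvSumComm {α β : Type} (l1 : List α) (l2 : List β) (f : α → β → Int) :
    (l1.map (fun a => (l2.map (fun b => f a b)).sum)).sum
      = (l2.map (fun b => (l1.map (fun a => f a b)).sum)).sum := by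
  induction l1 with
  | nil => simp
  | cons a t ih =>
    simp only [List.map_cons, List.sum_cons, ih]
    rw [← PySem.List.sum_map_add_int]

-- for one row at index i, the diagonal-indexed contributions over d ∈ [0, D) sum to a prefix
theorem pvRowDiag (row : List Int) (i : Int) (hi : 0 ≤ i) : ∀ (n : Nat),
    ((PySem.List.pyRange 0 (n : Int) 1).map
      (fun d => if 0 ≤ d - i ∧ d - i < (row.length : Int)
                then PySem.List.pyGetD row (d - i) 0 else 0)).sum
      = (row.take ((n : Int) - i).toNat).sum := by
  intro n
  induction n with
  | zero =>
    have h0 : (-i).toNat = 0 := by omega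
    simp [PySem.List.pyRange_one_eq_nil, h0]
  | succ n ih =>
    have hsplit : PySem.List.pyRange 0 ((n + 1 : Nat) : Int) 1
        = PySem.List.pyRange 0 (n : Int) 1 ++ [(n : Int)] := by
      have : ((n + 1 : Nat) : Int) = (n : Int) + 1 := by omega
      rw [this, PySem.List.pyRange_one_succ_right (by omega)]
    rw [hsplit, List.map_append, List.sum_append, ih]
    simp only [List.map_cons, List.map_nil, List.sum_cons, List.sum_nil, add_zero]
    by_cases h1 : 0 ≤ (n : Int) - i
    · by_cases h2 : (n : Int) - i < (row.length : Int)
      · rw [if_pos ⟨h1, h2⟩]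
        have hm : (((n : Nat) + 1 : Nat) - i.toNat) = ((n : Nat) - i.toNat) + 1 := by omega
        have hlt : ((n : Int) - i).toNat < row.length := by omega
        have hget : PySem.List.pyGetD row ((n : Int) - i) 0 = row[((n : Int) - i).toNat] := by
          have hx : (n : Int) - i = ((((n : Int) - i).toNat : Nat) : Int) := by omega
          conv_lhs => rw [hx]
          rw [PySem.List.pyGetD_natCast]
          exact List.getD_eq_getElem _ _ hlt
        have htn : (((n + 1 : Nat) : Int) - i).toNat = ((n : Int) - i).toNat + 1 := by omega
        rw [htn]
        rw [List.take_add_one, List.sum_append, hget]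
        have : row[((n : Int) - i).toNat]? = some (row[((n : Int) - i).toNat]) :=
          List.getElem?_eq_getElem hlt
        simp [this]
      · rw [if_neg (by tauto)]
        have hge : (row.length : Int) ≤ (n : Int) - i := by omega
        have e1 : row.take (((n + 1 : Nat) : Int) - i).toNat = row := by
          apply List.take_of_length_le; omega
        have e2 : row.take ((n : Int) - i).toNat = row := by
          apply List.take_of_length_le; omega
        rw [e1, e2]; ring
    · rw [if_neg (by tauto)]
      have : (((n + 1 : Nat) : Int) - i).toNat = ((n : Int) - i).toNat := by omega
      rw [this]; ring

-- membership facts for enumerate: index bounds and row membership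
theorem pvMemEnum {α : Type} (l : List α) (s : Int) (p : Int × α) (h : p ∈ PySem.List.enumerate l s) :
    s ≤ p.1 ∧ p.1 < s + (l.length : Int) ∧ p.2 ∈ l := by
  rw [PySem.List.mem_enumerate_iff] at h
  obtain ⟨kk, hk, rfl⟩ := h
  refine ⟨by omega, by omega, List.getElem_mem hk⟩

-- each row's length is bounded by pvWidth
theorem pvWidth_le (board : List (List Int)) (r : List Int) (hr : r ∈ board) :
    (r.length : Int) ≤ pvWidth board := by
  unfold pvWidth
  have key : ∀ (l : List (List Int)) (a : Int), r ∈ l → (r.length : Int) ≤ (l.map (fun x => (x.length : Int))).foldl max a := by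
    intro l
    induction l with
    | nil => intro a h; cases h
    | cons x t ih =>
      intro a h
      simp only [List.map_cons, List.foldl_cons]
      rcases List.mem_cons.mp h with h | h
      · subst h
        have : ∀ (m : List Int) (b : Int), b ≤ m.foldl max b := by
          intro m
          induction m with
          | nil => intro b; simp
          | cons y tt ihm =>
            intro b
            simp only [List.foldl_cons]
            exact le_trans (le_max_left b y) (ihm (max b y))
        exact le_trans (le_max_right a (r.length : Int)) (this _ _)
      · exact ih _ h
  exact key board 0 hr

-- ===== VERDICT (by name: the statement is the Claim_ definition above) =====
theorem solution_spec : Claim_equal_solution := by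
  intro board k _
  unfold Spec_solution solution solution_alt
  by_cases hb : board = []
  · subst hb; simp [pvOuterA]
  · rw [if_neg hb]
    set D : Int := min k ((board.length : Int) + pvWidth board - 2) + 1 with hD
    -- outer foldl of B as a double sum
    have hfold : (PySem.List.pyRange 0 D 1).foldl (fun res d => pvInnerB board d res) 0
        = ((PySem.List.pyRange 0 D 1).map (fun d =>
            ((PySem.List.enumerate board 0).map
              (fun p => if 0 ≤ d - p.1 ∧ d - p.1 < (p.2.length : Int)
                        then PySem.List.pyGetD p.2 (d - p.1) 0 else 0)).sum)).sum := by
      have : ∀ (l : List Int) (res : Int),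
          l.foldl (fun res d => pvInnerB board d res) res
          = res + (l.map (fun d =>
              ((PySem.List.enumerate board 0).map
                (fun p => if 0 ≤ d - p.1 ∧ d - p.1 < (p.2.length : Int)
                          then PySem.List.pyGetD p.2 (d - p.1) 0 else 0)).sum)).sum := by
        intro l
        induction l with
        | nil => intro res; simp
        | cons d t ih =>
          intro res
          simp only [List.foldl_cons, List.map_cons, List.sum_cons]
          rw [ih, pvInnerB_eq]
          ring
      rw [this]; ring
    rw [hfold, pvSumComm, pvOuterA_eq]
    simp only [zero_add]
    -- termwise: for each enumerated row, the diagonal sum equals A's prefix sum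
    apply congrArg
    apply List.map_congr_left
    intro p hp
    obtain ⟨h0, hlt, hmem⟩ := pvMemEnum board 0 p hp
    have hwidth := pvWidth_le board p.2 hmem
    by_cases hDpos : 0 ≤ D
    · have hDn : D = ((D.toNat : Nat) : Int) := by omega
      rw [hDn, pvRowDiag p.2 p.1 (by omega) D.toNat]
      -- the two take-bounds agree (either exactly, or both cover the whole row)
      by_cases hk : k ≤ (board.length : Int) + pvWidth board - 2
      · have : (((D.toNat : Nat) : Int) - p.1).toNat = (k - p.1 + 1).toNat := by omega
        rw [this]
      · have hlen : (p.2.length : Int) ≤ ((D.toNat : Nat) : Int) - p.1 := by omega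
        have hlen2 : (p.2.length : Int) ≤ k - p.1 + 1 := by omega
        rw [List.take_of_length_le (by omega), List.take_of_length_le (by omega)]
    · -- D < 0: no diagonals, and A's prefix is empty too (k < 0 ≤ i)
      rw [PySem.List.pyRange_one_eq_nil (by omega)]
      have : (k - p.1 + 1).toNat = 0 := by omega
      simp [this]
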